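-- pv_equiv track=rewrite | github.com/Mawak0/ACA | lab4.py | gray_permutations
-- ===== SOURCE A (Python) =====
-- def gray_permutations(n):
--     permutation_layers = [[[1,2], [2,1]]]
--     for i in range(1, n-1):
--         new_layer = []
--         for p_i in range(0, len(permutation_layers[i-1])):
--             if p_i % 2 == 0:
--                 new_layer.append(permutation_layers[i-1][p_i][::])
--                 new_layer[-1].insert(0, i+2)
--                 for sh in range(0, i+1):
--                     new_layer.append(new_layer[-1][::])
--                     new_layer[-1][sh], new_layer[-1][sh+1] = new_layer[-1][sh+1], new_layer[-1][sh]
--             else: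
--                 new_layer.append(permutation_layers[i-1][p_i][::])
--                 new_layer[-1].append(i+2)
--                 for sh in range(i+1, 0, -1):
--                     new_layer.append(new_layer[-1][::])
--                     new_layer[-1][sh], new_layer[-1][sh-1] = new_layer[-1][sh-1], new_layer[-1][sh]
--         permutation_layers.append(new_layer[::])
--     return permutation_layers
-- ===== SOURCE B (Python) =====
-- def gray_permutations(n):
--     layers = [[[1, 2], [2, 1]]]
--     for i in range(1, n - 1):
--         v = i + 2
--         layer = []
--         for p_i, p in enumerate(layers[-1]):
--             positions = range(i + 2) if p_i % 2 == 0 else range(i + 1, -1, -1)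
--             for pos in positions:
--                 layer.append(p[:pos] + [v] + p[pos:])
--         layers.append(layer)
--     return layers
-- ===== Notes on version B (the rewrite author's own statement) =====
-- stated objective: simpler
-- what changed: B builds each new layer statelessly by inserting the next value at every position of each predecessor permutation (sweep direction chosen by the predecessor's index parity), replacing A's mutable running copy that slides the new value by repeated adjacent swaps.
import Mathlib
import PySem

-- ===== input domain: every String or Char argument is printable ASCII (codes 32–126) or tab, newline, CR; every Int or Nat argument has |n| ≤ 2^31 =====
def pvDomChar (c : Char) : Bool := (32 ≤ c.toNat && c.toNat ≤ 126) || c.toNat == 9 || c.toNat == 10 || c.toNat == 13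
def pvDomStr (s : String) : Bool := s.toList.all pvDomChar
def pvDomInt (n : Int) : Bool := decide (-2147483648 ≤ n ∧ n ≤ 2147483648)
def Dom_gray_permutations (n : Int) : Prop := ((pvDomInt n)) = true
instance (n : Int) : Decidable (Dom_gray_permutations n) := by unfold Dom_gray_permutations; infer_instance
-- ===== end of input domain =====

-- B rebuilds each layer statelessly by inserting the new value at every position of each
-- predecessor (direction by index parity) instead of A's running copy-and-adjacent-swap chain;
-- objective: simpler (no mutable running permutation), same asymptotic cost.

-- ===== PORT A =====
-- Python 'xs[a], xs[b] = xs[b], xs[a]': exact for the indices A uses (0 ≤ a, b; both in range,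
-- where Python's pyGet? is some); Python would raise IndexError where pyGet? is none.
def pySwap (xs : List Int) (a b : Int) : List Int :=
  match PySem.List.pyGet? xs a, PySem.List.pyGet? xs b with
  | some va, some vb => (xs.set a.toNat vb).set b.toNat va
  | _, _ => xs

-- 'p[::]' copy is the list itself; 'l.insert(0, x)' is 'x :: l'.
def gray_permutations (n : Int) : List (List (List Int)) :=
  (PySem.List.pyRange 1 (n-1) 1).foldl (fun permutation_layers i =>
    let prev := PySem.List.pyGetD permutation_layers (i-1) []
    let new_layer := (PySem.List.pyRange 0 (prev.length : Int) 1).foldl (fun new_layer p_i =>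
      let p := PySem.List.pyGetD prev p_i []
      if PySem.Int.mod p_i 2 == 0 then
        (PySem.List.pyRange 0 (i+1) 1).foldl (fun nl sh =>
            nl ++ [pySwap (PySem.List.pyGetD nl (-1) []) sh (sh+1)])
          (new_layer ++ [(i+2) :: p])
      else
        (PySem.List.pyRange (i+1) 0 (-1)).foldl (fun nl sh =>
            nl ++ [pySwap (PySem.List.pyGetD nl (-1) []) sh (sh-1)])
          (new_layer ++ [p ++ [i+2]])) []
    permutation_layers ++ [new_layer]) [[[1,2],[2,1]]]

-- ===== PORT B =====
def gray_permutations_alt (n : Int) : List (List (List Int)) :=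
  (PySem.List.pyRange 1 (n-1) 1).foldl (fun layers i =>
    let v := i + 2
    let prev := PySem.List.pyGetD layers (-1) []
    let layer := (PySem.List.enumerate prev 0).foldl (fun layer pp =>
        let positions := if PySem.Int.mod pp.1 2 == 0 then PySem.List.pyRange 0 (i+2) 1
                         else PySem.List.pyRange (i+1) (-1) (-1)
        positions.foldl (fun layer pos =>
          layer ++ [PySem.List.slice pp.2 none (some pos) ++ [v] ++ PySem.List.slice pp.2 (some pos) none]) layer) []
    layers ++ [layer]) [[[1,2],[2,1]]]

-- ===== PRECONDITION & SPEC =====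
def Spec_gray_permutations (n : Int) (out : List (List (List Int))) : Prop := out = gray_permutations_alt n
instance (n : Int) (out : List (List (List Int))) : Decidable (Spec_gray_permutations n out) := by unfold Spec_gray_permutations; infer_instance

-- ===== CLAIM (what is proved, stated in full; the proofs are below) =====
def Claim_equal_gray_permutations : Prop := ∀ (n : Int), Dom_gray_permutations n → Spec_gray_permutations n (gray_permutations n)

-- ===== LEMMAS AND PROOFS =====

-- 'insert v at position t' — the common value both layer constructions produce
def insV (p : List Int) (v : Int) (t : Nat) : List Int := p.take t ++ v :: p.drop t

lemma pySwap_cons (x : Int) (l : List Int) (a b : Nat) :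
    pySwap (x :: l) ((a:Int)+1) ((b:Int)+1) = x :: pySwap l a b := by
  unfold pySwap
  rw [PySem.List.pyGet?_cons_succ, PySem.List.pyGet?_cons_succ]
  have ha : ((a:Int)+1).toNat = a + 1 := by omega
  have hb : ((b:Int)+1).toNat = b + 1 := by omega
  cases h1 : PySem.List.pyGet? l (a:Int) <;> cases h2 : PySem.List.pyGet? l (b:Int) <;>
    simp [ha, hb, Int.toNat_natCast, List.set_cons_succ]

lemma swap_ins (p : List Int) (v : Int) : ∀ (k : Nat), k < p.length →
    pySwap (insV p v k) (k:Int) ((k:Int)+1) = insV p v (k+1) := by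
  induction p with
  | nil => intro k h; simp at h
  | cons x t ih =>
    intro k hk
    cases k with
    | zero => simp [insV, pySwap, PySem.List.pyGet?, PySem.List.pyIdx?, show (0:Int) ≤ (t.length:Int)+1 by positivity]
    | succ k =>
      have hk' : k < t.length := by simpa using hk
      simp only [insV, List.take_succ_cons, List.drop_succ_cons, List.cons_append]
      rw [show ((k+1:Nat):Int) = (k:Int)+1 by push_cast; ring,
          show (k:Int)+1+1 = ((k+1:Nat):Int)+1 by push_cast; ring,
          pySwap_cons x _ k (k+1)]
      have := ih k hk'
      simp [insV] at this
      simp [this]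

lemma swap_ins_rev (p : List Int) (v : Int) : ∀ (k : Nat), k < p.length →
    pySwap (insV p v (k+1)) ((k:Int)+1) (k:Int) = insV p v k := by
  induction p with
  | nil => intro k h; simp at h
  | cons x t ih =>
    intro k hk
    cases k with
    | zero => simp [insV, pySwap, PySem.List.pyGet?, PySem.List.pyIdx?, show (0:Int) ≤ (t.length:Int)+1 by positivity]
    | succ k =>
      have hk' : k < t.length := by simpa using hk
      simp only [insV, List.take_succ_cons, List.drop_succ_cons, List.cons_append]
      rw [show ((k+1:Nat):Int)+1 = ((k+1:Nat):Int)+1 by rfl,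
          show ((k+1:Nat):Int) = (k:Int)+1 by push_cast; ring,
          show ((k:Int)+1)+1 = ((k+1:Nat):Int)+1 by push_cast; ring,
          pySwap_cons x _ (k+1) k]
      have := ih k hk'
      simp [insV] at this
      simp [this]

lemma chainE (p : List Int) (v : Int) : ∀ (k j : Nat) (acc : List (List Int)), j + k ≤ p.length →
    (PySem.List.pyRange (j:Int) ((j+k : Nat) : Int) 1).foldl
      (fun nl sh => nl ++ [pySwap (PySem.List.pyGetD nl (-1) []) sh (sh+1)])
      (acc ++ [insV p v j])
    = acc ++ (List.range' j (k+1)).map (insV p v) := by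
  intro k
  induction k with
  | zero =>
    intro j acc h
    rw [PySem.List.pyRange_one_eq_nil (by omega)]
    simp
  | succ k ih =>
    intro j acc h
    rw [PySem.List.pyRange_one_cons (by push_cast; omega)]
    simp only [List.foldl_cons, PySem.List.pyGetD_neg_one_append_singleton]
    rw [swap_ins p v j (by omega)]
    have hcast : ((j:Int))+1 = ((j+1 : Nat) : Int) := by push_cast; ring
    have hcast2 : ((j+(k+1) : Nat) : Int) = (((j+1)+k : Nat) : Int) := by push_cast; ring
    rw [hcast, hcast2, ih (j+1) (acc ++ [insV p v j]) (by omega)]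
    simp [List.range'_succ]

lemma chainO (p : List Int) (v : Int) : ∀ (k j : Nat) (acc : List (List Int)), j + k ≤ p.length →
    (PySem.List.pyRange ((j+k : Nat) : Int) (j:Int) (-1)).foldl
      (fun nl sh => nl ++ [pySwap (PySem.List.pyGetD nl (-1) []) sh (sh-1)])
      (acc ++ [insV p v (j+k)])
    = acc ++ ((List.range' j (k+1)).map (insV p v)).reverse := by
  intro k
  induction k with
  | zero =>
    intro j acc h
    rw [PySem.List.pyRange_neg_one_eq_nil (by omega)]
    simp
  | succ k ih =>
    intro j acc h
    rw [PySem.List.pyRange_neg_one_cons (by push_cast; omega)]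
    simp only [List.foldl_cons, PySem.List.pyGetD_neg_one_append_singleton]
    rw [show ((j+(k+1) : Nat) : Int) = ((j+k : Nat) : Int) + 1 by push_cast; ring]
    rw [show ((j+k : Nat) : Int) + 1 - 1 = ((j+k : Nat) : Int) by ring]
    rw [show insV p v (j+(k+1)) = insV p v ((j+k)+1) by ring_nf]
    rw [swap_ins_rev p v (j+k) (by omega)]
    rw [List.append_assoc,
        show [insV p v ((j+k)+1)] ++ [insV p v (j+k)] = [insV p v (j+k+1), insV p v (j+k)] by simp]
    rw [show acc ++ [insV p v (j+k+1), insV p v (j+k)]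
          = (acc ++ [insV p v (j+k+1)]) ++ [insV p v (j+k)] by simp]
    rw [ih j (acc ++ [insV p v (j+k+1)]) (by omega)]
    rw [show List.range' j (k+1+1) = List.range' j (k+1) ++ [j+(k+1)] from by
          simpa using List.range'_concat (s := j) (n := k+1) (step := 1)]
    simp [show j+(k+1) = j+k+1 by ring]

-- A's index loop over range(len(full)) with full[j] reads = a loop over enumerate(full)
lemma foldl_idx {β : Type} (g : β → Int → List Int → β) :
    ∀ (fuel : Nat) (full : List (List Int)) (s : Nat) (init : β), full.length - s = fuel →
    (PySem.List.pyRange (s:Int) (full.length:Int) 1).foldl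
        (fun acc j => g acc j (PySem.List.pyGetD full j [])) init
    = (PySem.List.enumerate (full.drop s) (s:Int)).foldl (fun acc pp => g acc pp.1 pp.2) init := by
  intro fuel
  induction fuel with
  | zero =>
    intro full s init h
    have hle : full.length ≤ s := by omega
    rw [PySem.List.pyRange_one_eq_nil (by exact_mod_cast hle), List.drop_eq_nil_of_le hle]
    simp [PySem.List.enumerate]
  | succ fuel ih =>
    intro full s init h
    have hs : s < full.length := by omega
    rw [PySem.List.pyRange_one_cons (by exact_mod_cast hs)]
    rw [List.drop_eq_getElem_cons hs, PySem.List.enumerate_cons]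
    simp only [List.foldl_cons]
    rw [show ((s:Int)+1) = ((s+1 : Nat) : Int) by push_cast; ring]
    rw [ih full (s+1) _ (by omega)]
    congr 1
    simp [PySem.List.pyGetD_natCast, List.getD_eq_getElem?_getD, List.getElem?_eq_getElem hs]

lemma blockA_even (m : Nat) (p : List Int) (v : Int) (acc : List (List Int)) (hp : p.length = m+1) :
    (PySem.List.pyRange 0 ((m:Int)+1) 1).foldl
      (fun nl sh => nl ++ [pySwap (PySem.List.pyGetD nl (-1) []) sh (sh+1)]) (acc ++ [v :: p])
    = acc ++ (List.range (m+2)).map (insV p v) := by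
  have h0 : v :: p = insV p v 0 := by simp [insV]
  have := chainE p v (m+1) 0 acc (by omega)
  simp only [Nat.zero_add, Nat.cast_zero] at this
  rw [h0, show (m:Int)+1 = ((m+1 : Nat) : Int) from by push_cast; ring, List.range_eq_range']
  simpa using this

lemma blockA_odd (m : Nat) (p : List Int) (v : Int) (acc : List (List Int)) (hp : p.length = m+1) :
    (PySem.List.pyRange ((m:Int)+1) 0 (-1)).foldl
      (fun nl sh => nl ++ [pySwap (PySem.List.pyGetD nl (-1) []) sh (sh-1)]) (acc ++ [p ++ [v]])
    = acc ++ ((List.range (m+2)).map (insV p v)).reverse := by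
  have h0 : p ++ [v] = insV p v (m+1) := by
    simp [insV, List.take_of_length_le (le_of_eq hp), List.drop_eq_nil_of_le (le_of_eq hp)]
  have := chainO p v (m+1) 0 acc (by omega)
  simp only [Nat.zero_add, Nat.cast_zero] at this
  rw [h0, show (m:Int)+1 = ((m+1 : Nat) : Int) from by push_cast; ring, List.range_eq_range']
  simpa using this

lemma blockB_even (m : Nat) (p : List Int) (v : Int) (acc : List (List Int)) :
    (PySem.List.pyRange 0 ((m:Int)+2) 1).foldl
      (fun layer pos => layer ++ [PySem.List.slice p none (some pos) ++ [v] ++ PySem.List.slice p (some pos) none]) acc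
    = acc ++ (List.range (m+2)).map (insV p v) := by
  rw [PySem.List.foldl_append_singleton_eq_map]
  congr 1
  rw [show ((m:Int)+2) = ((m+2 : Nat) : Int) from by push_cast; ring, PySem.List.pyRange_one 0]
  rw [List.map_map, show ((((m+2:Nat):Int)) - 0).toNat = m+2 from by omega]
  apply List.map_congr_left
  intro k hk
  simp [Function.comp, PySem.List.slice_to_natCast, PySem.List.slice_from_natCast, insV]

lemma blockB_odd (m : Nat) (p : List Int) (v : Int) (acc : List (List Int)) :
    (PySem.List.pyRange ((m:Int)+1) (-1) (-1)).foldl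
      (fun layer pos => layer ++ [PySem.List.slice p none (some pos) ++ [v] ++ PySem.List.slice p (some pos) none]) acc
    = acc ++ ((List.range (m+2)).map (insV p v)).reverse := by
  rw [PySem.List.pyRange_neg_one_eq_reverse]
  rw [PySem.List.foldl_append_singleton_eq_map]
  congr 1
  rw [show (-1 : Int)+1 = 0 from by ring, show ((m:Int)+1+1) = ((m+2 : Nat) : Int) from by push_cast; ring]
  rw [List.map_reverse, PySem.List.pyRange_one 0]
  rw [List.map_map, show ((((m+2:Nat):Int)) - 0).toNat = m+2 from by omega]
  congr 1
  apply List.map_congr_left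
  intro k hk
  simp [Function.comp, PySem.List.slice_to_natCast, PySem.List.slice_from_natCast, insV]

-- what one predecessor (index, permutation) contributes to the next layer
def pvF (m : Nat) (pp : Int × List Int) : List (List Int) :=
  if PySem.Int.mod pp.1 2 == 0 then (List.range (m+2)).map (insV pp.2 ((m:Int)+2))
  else ((List.range (m+2)).map (insV pp.2 ((m:Int)+2))).reverse

lemma enumA_flat (m : Nat) : ∀ (l : List (Int × List Int)) (acc : List (List Int)),
    (∀ pp ∈ l, pp.2.length = m+1) →
    l.foldl (fun acc pp =>
      if PySem.Int.mod pp.1 2 == 0 then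
        (PySem.List.pyRange 0 ((m:Int)+1) 1).foldl (fun nl sh =>
            nl ++ [pySwap (PySem.List.pyGetD nl (-1) []) sh (sh+1)])
          (acc ++ [((m:Int)+2) :: pp.2])
      else
        (PySem.List.pyRange ((m:Int)+1) 0 (-1)).foldl (fun nl sh =>
            nl ++ [pySwap (PySem.List.pyGetD nl (-1) []) sh (sh-1)])
          (acc ++ [pp.2 ++ [(m:Int)+2]])) acc
    = acc ++ l.flatMap (pvF m) := by
  intro l
  induction l with
  | nil => intro acc h; simp
  | cons pp l ih =>
    intro acc h
    have hp : pp.2.length = m+1 := h pp (by simp)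
    simp only [List.foldl_cons]
    by_cases hc : PySem.Int.mod pp.1 2 == 0
    · rw [if_pos hc, blockA_even m pp.2 ((m:Int)+2) acc hp,
          ih _ (fun q hq => h q (by simp [hq]))]
      simp only [pvF, List.flatMap_cons]
      rw [if_pos hc]
      simp
    · rw [if_neg hc, blockA_odd m pp.2 ((m:Int)+2) acc hp,
          ih _ (fun q hq => h q (by simp [hq]))]
      simp only [pvF, List.flatMap_cons]
      rw [if_neg hc]
      simp

lemma enumB_flat (m : Nat) : ∀ (l : List (Int × List Int)) (acc : List (List Int)),
    l.foldl (fun layer pp =>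
      (if PySem.Int.mod pp.1 2 == 0 then PySem.List.pyRange 0 ((m:Int)+2) 1
       else PySem.List.pyRange ((m:Int)+1) (-1) (-1)).foldl (fun layer pos =>
        layer ++ [PySem.List.slice pp.2 none (some pos) ++ [((m:Int)+2)] ++ PySem.List.slice pp.2 (some pos) none]) layer) acc
    = acc ++ l.flatMap (pvF m) := by
  intro l
  induction l with
  | nil => intro acc; simp
  | cons pp l ih =>
    intro acc
    simp only [List.foldl_cons]
    by_cases hc : PySem.Int.mod pp.1 2 == 0
    · rw [if_pos hc, blockB_even m pp.2 ((m:Int)+2) acc, ih]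
      simp only [pvF, List.flatMap_cons]
      rw [if_pos hc]
      simp
    · rw [if_neg hc, blockB_odd m pp.2 ((m:Int)+2) acc, ih]
      simp only [pvF, List.flatMap_cons]
      rw [if_neg hc]
      simp

lemma insV_len (p : List Int) (v : Int) (t : Nat) (h : t ≤ p.length) :
    (insV p v t).length = p.length + 1 := by
  simp only [insV, List.length_append, List.length_cons, List.length_take, List.length_drop]
  omega

lemma flat_len (m : Nat) (l : List (Int × List Int)) (h : ∀ pp ∈ l, pp.2.length = m+1) :
    ∀ q ∈ l.flatMap (pvF m), q.length = m+2 := by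
  intro q hq
  rw [List.mem_flatMap] at hq
  obtain ⟨pp, hpp, hqf⟩ := hq
  have hp : pp.2.length = m+1 := h pp hpp
  have : ∀ r ∈ (List.range (m+2)).map (insV pp.2 ((m:Int)+2)), r.length = m+2 := by
    intro r hr
    rw [List.mem_map] at hr
    obtain ⟨t, ht, rfl⟩ := hr
    rw [List.mem_range] at ht
    rw [insV_len pp.2 _ t (by omega), hp]
  unfold pvF at hqf
  by_cases hc : PySem.Int.mod pp.1 2 == 0
  · rw [if_pos hc] at hqf; exact this q hqf
  · rw [if_neg hc] at hqf; exact this q (List.mem_reverse.mp hqf)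

lemma outer (c : Nat) : ∀ (i : Int) (layers : List (List (List Int))), 1 ≤ i →
    layers.length = i.toNat →
    (∀ p ∈ PySem.List.pyGetD layers (-1) ([] : List (List Int)), p.length = i.toNat + 1) →
    (PySem.List.pyRange i (i + (c:Int)) 1).foldl (fun permutation_layers i =>
      permutation_layers ++ [(PySem.List.pyRange 0 ((PySem.List.pyGetD permutation_layers (i-1) ([] : List (List Int))).length : Int) 1).foldl (fun new_layer p_i =>
        if PySem.Int.mod p_i 2 == 0 then
          (PySem.List.pyRange 0 (i+1) 1).foldl (fun nl sh =>
              nl ++ [pySwap (PySem.List.pyGetD nl (-1) []) sh (sh+1)])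
            (new_layer ++ [(i+2) :: PySem.List.pyGetD (PySem.List.pyGetD permutation_layers (i-1) ([] : List (List Int))) p_i []])
        else
          (PySem.List.pyRange (i+1) 0 (-1)).foldl (fun nl sh =>
              nl ++ [pySwap (PySem.List.pyGetD nl (-1) []) sh (sh-1)])
            (new_layer ++ [PySem.List.pyGetD (PySem.List.pyGetD permutation_layers (i-1) ([] : List (List Int))) p_i [] ++ [i+2]])) []]) layers
    = (PySem.List.pyRange i (i + (c:Int)) 1).foldl (fun layers i =>
      layers ++ [(PySem.List.enumerate (PySem.List.pyGetD layers (-1) ([] : List (List Int))) 0).foldl (fun layer pp =>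
        (if PySem.Int.mod pp.1 2 == 0 then PySem.List.pyRange 0 (i+2) 1
         else PySem.List.pyRange (i+1) (-1) (-1)).foldl (fun layer pos =>
          layer ++ [PySem.List.slice pp.2 none (some pos) ++ [i+2] ++ PySem.List.slice pp.2 (some pos) none]) layer) []]) layers := by
  induction c with
  | zero =>
    intro i layers h1 hlen hlast
    rw [show i + ((0:Nat):Int) = i from by push_cast; ring,
        PySem.List.pyRange_one_eq_nil (le_refl i)]
    rfl
  | succ c ih =>
    intro i layers h1 hlen hlast
    obtain ⟨m, rfl⟩ : ∃ m : Nat, i = (m:Int) := ⟨i.toNat, (Int.toNat_of_nonneg (by omega)).symm⟩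
    have hm : 1 ≤ m := by exact_mod_cast h1
    rw [show (m:Int) + ((c+1:Nat):Int) = (m:Int) + (↑c + 1) from by push_cast; ring]
    rw [PySem.List.pyRange_one_cons (by omega)]
    simp only [List.foldl_cons]
    -- the previous layer read two ways
    have hlen' : layers.length = m := by simpa using hlen
    have hne : layers ≠ [] := by
      intro hnil; rw [hnil] at hlen; simp at hlen; omega
    have hprev : PySem.List.pyGetD layers ((m:Int)-1) ([] : List (List Int))
        = PySem.List.pyGetD layers (-1) ([] : List (List Int)) := by
      rw [PySem.List.pyGetD_neg_one layers ([] : List (List Int)) hne, List.getLast_eq_getElem]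
      rw [PySem.List.pyGetD_eq_getElem _ _ (by omega)
        (by rw [hlen']; exact_mod_cast (by omega : ((m:Int)-1) < (m:Int)))]
      congr 1
      rw [hlen']
      omega
    set prev := PySem.List.pyGetD layers (-1) ([] : List (List Int)) with hprevdef
    rw [hprev]
    -- lengths of the permutations in prev
    have hplen : ∀ pp ∈ PySem.List.enumerate prev 0, pp.2.length = m + 1 := by
      intro pp hpp
      rcases (PySem.List.mem_enumerate_iff _ _ _).mp hpp with ⟨k, hk, rfl⟩
      have : prev[k] ∈ prev := List.getElem_mem hk
      have := hlast _ this
      simpa [Int.toNat_natCast] using this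
    -- A's inner index loop as an enumerate loop, then both layers as the same flatMap
    have HA := foldl_idx
      (g := fun acc (j : Int) (p : List Int) =>
        if PySem.Int.mod j 2 == 0 then
          (PySem.List.pyRange 0 ((m:Int)+1) 1).foldl (fun nl sh =>
              nl ++ [pySwap (PySem.List.pyGetD nl (-1) []) sh (sh+1)])
            (acc ++ [((m:Int)+2) :: p])
        else
          (PySem.List.pyRange ((m:Int)+1) 0 (-1)).foldl (fun nl sh =>
              nl ++ [pySwap (PySem.List.pyGetD nl (-1) []) sh (sh-1)])
            (acc ++ [p ++ [(m:Int)+2]]))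
      prev.length prev 0 ([] : List (List Int)) (by omega)
    simp only [Nat.cast_zero, List.drop_zero] at HA
    rw [HA, enumA_flat m (PySem.List.enumerate prev 0) [] hplen,
        enumB_flat m (PySem.List.enumerate prev 0) []]
    -- one step done; apply the induction hypothesis at i+1
    rw [show (m:Int) + ((c:Int)+1) = ((m:Int)+1) + (c:Int) from by ring]
    exact ih ((m:Int)+1)
      (layers ++ [[] ++ (PySem.List.enumerate prev 0).flatMap (pvF m)])
      (by omega)
      (by simp only [List.length_append, List.length_cons, List.length_nil, hlen']; omega)
      (by
        rw [PySem.List.pyGetD_neg_one_append_singleton]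
        intro q hq
        simp only [List.nil_append] at hq
        have := flat_len m (PySem.List.enumerate prev 0) hplen q hq
        rw [this]
        omega)

-- ===== VERDICT (by name: the statement is the Claim_ definition above) =====
theorem gray_permutations_spec : Claim_equal_gray_permutations := by
  intro n _
  unfold Spec_gray_permutations gray_permutations gray_permutations_alt
  by_cases h : n - 1 ≤ 1
  · rw [PySem.List.pyRange_one_eq_nil h]
    rfl
  · have hc : n - 1 = 1 + (((n-2).toNat : Nat) : Int) := by omega
    rw [hc]
    exact outer (n-2).toNat 1 [[[1,2],[2,1]]] (by norm_num) (by decide) (by decide)
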